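-- pv_equiv track=rewrite | github.com/shantanusharma/headroom | tests/test_transforms/test_anchor_selector.py | generate_log_data
-- ===== SOURCE A (Python) =====
-- def generate_log_data(
--     n: int = 50,
--     error_positions: list[int] | None = None,
-- ) -> list[dict]:
--     """Generate log-style data with optional errors at specific positions."""
--     levels = ["INFO", "DEBUG", "WARN"]
--     items = []
--     for i in range(n):
--         level = levels[i % len(levels)]
--         if error_positions and i in error_positions:
--             level = "ERROR"
--             message = f"Critical failure at step {i}: connection timeout"
--         else:
--             message = f"Processing request {i} successfully"
--         items.append(
--             {
--                 "level": level,
--                 "message": message,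
--                 "timestamp": f"2025-01-06T{12 + (i // 60):02d}:{i % 60:02d}:00Z",
--             }
--         )
--     return items
-- ===== SOURCE B (Python) =====
-- def generate_log_data(
--     n: int = 50,
--     error_positions: list[int] | None = None,
-- ) -> list[dict]:
--     """Build all default rows in one pass, then patch the error positions."""
--     levels = ["INFO", "DEBUG", "WARN"]
--     items = [
--         {
--             "level": levels[i % 3],
--             "message": f"Processing request {i} successfully",
--             "timestamp": f"2025-01-06T{12 + (i // 60):02d}:{i % 60:02d}:00Z",
--         }
--         for i in range(n)
--     ]
--     for p in error_positions or ():
--         if 0 <= p < n: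
--             items[p]["level"] = "ERROR"
--             items[p]["message"] = f"Critical failure at step {p}: connection timeout"
--     return items
-- ===== Notes on version B (the rewrite author's own statement) =====
-- stated objective: faster
-- what changed: Instead of testing 'i in error_positions' inside the row-building loop, B builds all default rows in one comprehension and then patches the rows at valid error positions in a second pass over error_positions.
import Mathlib
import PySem

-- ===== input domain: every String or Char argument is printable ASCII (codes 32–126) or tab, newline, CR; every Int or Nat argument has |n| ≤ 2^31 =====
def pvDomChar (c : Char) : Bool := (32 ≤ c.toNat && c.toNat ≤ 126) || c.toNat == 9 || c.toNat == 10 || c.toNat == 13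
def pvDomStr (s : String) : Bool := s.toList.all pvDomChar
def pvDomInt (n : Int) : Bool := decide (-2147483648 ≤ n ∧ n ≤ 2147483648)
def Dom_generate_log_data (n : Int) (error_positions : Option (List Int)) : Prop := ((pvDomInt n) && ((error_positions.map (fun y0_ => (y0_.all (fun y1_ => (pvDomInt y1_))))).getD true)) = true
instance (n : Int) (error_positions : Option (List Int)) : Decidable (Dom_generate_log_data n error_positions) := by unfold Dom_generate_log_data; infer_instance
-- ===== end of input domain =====

-- B builds all default rows in one pass and then patches the error positions in a second
-- pass, instead of testing 'i in error_positions' for every row (objective: faster — drops the per-row membership scan, O(n*k) -> O(n+k)).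

-- ===== PORT A =====

-- f"{v:02d}": exact for the values reached here (v is always ≥ 0: hours ≥ 12, minutes 0..59)
def pvPad2 (v : Int) : String :=
  let s := PySem.Int.toStr v
  if PySem.Str.len s < 2 then "0" ++ s else s

-- f"2025-01-06T{12 + (i // 60):02d}:{i % 60:02d}:00Z"
def pvTimestamp (i : Int) : String :=
  "2025-01-06T" ++ pvPad2 (12 + PySem.Int.floordiv i 60) ++ ":" ++ pvPad2 (PySem.Int.mod i 60) ++ ":00Z"

def pvOkMsg (i : Int) : String := "Processing request " ++ PySem.Int.toStr i ++ " successfully"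

def pvErrMsg (i : Int) : String := "Critical failure at step " ++ PySem.Int.toStr i ++ ": connection timeout"

-- 'error_positions and i in error_positions' (None and [] are falsy)
def pvErrTruthy (error_positions : Option (List Int)) (i : Int) : Bool :=
  match error_positions with
  | none => false
  | some l => !l.isEmpty && l.contains i

def generate_log_data (n : Int) (error_positions : Option (List Int)) : List (List (String × String)) :=
  let levels := ["INFO", "DEBUG", "WARN"]
  (PySem.List.pyRange 0 n 1).foldl (fun items i =>
    let level := PySem.List.pyGetD levels (PySem.Int.mod i 3) ""
    let (level, message) :=
      if pvErrTruthy error_positions i then ("ERROR", pvErrMsg i)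
      else (level, pvOkMsg i)
    items ++ [[("level", level), ("message", message), ("timestamp", pvTimestamp i)]]) []

-- ===== PORT B =====

-- 'd[k] = v' on a dict: overwrite in place, append if the key is new (exact for dict item assignment)
def pvSetKey (d : List (String × String)) (k : String) (v : String) : List (String × String) :=
  match d with
  | [] => [(k, v)]
  | (k', v') :: rest => if k' == k then (k, v) :: rest else (k', v') :: pvSetKey rest k v

def pvBaseRow (i : Int) : List (String × String) :=
  [("level", PySem.List.pyGetD ["INFO", "DEBUG", "WARN"] (PySem.Int.mod i 3) ""),
   ("message", pvOkMsg i),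
   ("timestamp", pvTimestamp i)]

def generate_log_data_alt (n : Int) (error_positions : Option (List Int)) : List (List (String × String)) :=
  let items := (PySem.List.pyRange 0 n 1).map pvBaseRow
  (error_positions.getD []).foldl (fun items p =>
    if 0 ≤ p ∧ p < n then
      items.modify p.toNat (fun row => pvSetKey (pvSetKey row "level" "ERROR") "message" (pvErrMsg p))
    else items) items

-- ===== PRECONDITION & SPEC =====
def Spec_generate_log_data (n : Int) (error_positions : Option (List Int)) (out : List (List (String × String))) : Prop := out = generate_log_data_alt n error_positions
instance (n : Int) (error_positions : Option (List Int)) (out : List (List (String × String))) : Decidable (Spec_generate_log_data n error_positions out) := by unfold Spec_generate_log_data; infer_instance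

-- ===== CLAIM (what is proved, stated in full; the proofs are below) =====
def Claim_equal_generate_log_data : Prop := ∀ (n : Int) (error_positions : Option (List Int)), Dom_generate_log_data n error_positions → Spec_generate_log_data n error_positions (generate_log_data n error_positions)

-- ===== LEMMAS AND PROOFS =====

def pvErrRow (i : Int) : List (String × String) :=
  [("level", "ERROR"), ("message", pvErrMsg i), ("timestamp", pvTimestamp i)]

-- patching a base row yields the error row
theorem pv_patch_base (i : Int) :
    pvSetKey (pvSetKey (pvBaseRow i) "level" "ERROR") "message" (pvErrMsg i) = pvErrRow i := by
  simp [pvBaseRow, pvErrRow, pvSetKey]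

-- patching an error row is idempotent
theorem pv_patch_err (i : Int) :
    pvSetKey (pvSetKey (pvErrRow i) "level" "ERROR") "message" (pvErrMsg i) = pvErrRow i := by
  simp [pvErrRow, pvSetKey]

-- modify at a valid position of a mapped range = pointwise update
theorem pv_modify_map_pyRange (n p : Int) (h0 : 0 ≤ p)
    (g : Int → List (String × String)) (f : List (String × String) → List (String × String)) :
    ((PySem.List.pyRange 0 n 1).map g).modify p.toNat f
      = (PySem.List.pyRange 0 n 1).map (fun i => if i = p then f (g i) else g i) := by
  apply List.ext_getElem
  · simp
  · intro k hk hk'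
    simp only [List.length_map] at hk'
    have hlen : (PySem.List.pyRange 0 n 1)[k] = (0 : Int) + (k : Int) :=
      PySem.List.getElem_pyRange_one 0 n k hk'
    rw [List.getElem_modify]
    simp only [List.getElem_map, hlen, zero_add]
    by_cases h : p.toNat = k
    · subst h
      simp [Int.toNat_of_nonneg h0]
    · have hne : ¬ ((k : Int) = p) := by
        intro he
        apply h
        omega
      simp [h, hne]

-- the patching fold over the positions, on any state that is a mapped range of rows
-- each of which patches to the error row
theorem pv_fold_patch (n : Int) (l : List Int) (g : Int → List (String × String))
    (hg : ∀ i, pvSetKey (pvSetKey (g i) "level" "ERROR") "message" (pvErrMsg i) = pvErrRow i) :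
    l.foldl (fun items p =>
        if 0 ≤ p ∧ p < n then
          items.modify p.toNat (fun row => pvSetKey (pvSetKey row "level" "ERROR") "message" (pvErrMsg p))
        else items) ((PySem.List.pyRange 0 n 1).map g)
      = (PySem.List.pyRange 0 n 1).map (fun i => if i ∈ l then pvErrRow i else g i) := by
  induction l generalizing g with
  | nil => simp
  | cons p l' ih =>
    simp only [List.foldl_cons]
    by_cases hp : 0 ≤ p ∧ p < n
    · rw [if_pos hp, pv_modify_map_pyRange n p hp.1]
      have step : ∀ i, (if i = p then pvSetKey (pvSetKey (g i) "level" "ERROR") "message" (pvErrMsg p)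
          else g i) = (fun i => if i = p then pvErrRow i else g i) i := by
        intro i
        by_cases hi : i = p
        · subst hi; simp [hg i]
        · simp [hi]
      rw [List.map_congr_left (fun i _ => step i)]
      rw [ih (fun i => if i = p then pvErrRow i else g i) ?_]
      · apply List.map_congr_left
        intro i _
        by_cases hm : i ∈ l' <;> by_cases hi : i = p <;> simp [hm, hi]
      · intro i
        by_cases hi : i = p
        · subst hi; simp [pv_patch_err]
        · simp [hi, hg i]
    · rw [if_neg hp, ih g hg]
      apply List.map_congr_left
      intro i hi
      have hir : 0 ≤ i ∧ i < n := by
        have := (PySem.List.mem_pyRange_one).mp hi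
        exact ⟨this.1, this.2⟩
      have hip : ¬ i = p := by rintro rfl; exact hp hir
      by_cases hm : i ∈ l' <;> simp [hm, hip]

-- A's per-row branch is membership in the (defaulted) positions list
theorem pv_truthy_mem (error_positions : Option (List Int)) (i : Int) :
    pvErrTruthy error_positions i = decide (i ∈ error_positions.getD []) := by
  cases error_positions with
  | none => simp [pvErrTruthy]
  | some l =>
    cases l with
    | nil => simp [pvErrTruthy]
    | cons x xs => simp [pvErrTruthy, List.isEmpty]

-- ===== VERDICT (by name: the statement is the Claim_ definition above) =====
theorem generate_log_data_spec : Claim_equal_generate_log_data := by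
  intro n error_positions _
  unfold Spec_generate_log_data generate_log_data generate_log_data_alt
  rw [PySem.List.foldl_append_singleton_eq_map, List.nil_append]
  rw [pv_fold_patch n (error_positions.getD []) pvBaseRow (fun i => pv_patch_base i)]
  apply List.map_congr_left
  intro i _
  rw [pv_truthy_mem]
  by_cases hm : i ∈ error_positions.getD []
  · simp [hm, pvErrRow]
  · simp [hm, pvBaseRow]
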